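-- pv_equiv track=rewrite | github.com/Magorx/learning | LKSH/winter16-17/Kirzhanovsky/bot-kokos.py | count_before_max
-- ===== SOURCE A (Python) =====
-- def count_before_max(arr):
--     if not arr:
--         return None
--     mx = max(arr)
--     mx2 = float("-inf")
--     count = 0
--     for i in range(len(arr)):
--         if arr[i] < mx and arr[i] > mx2:
--             mx2 = arr[i]
--             count = 1
--         elif arr[i] == mx2:
--             count += 1
--     if mx2 < -1 or count == 0:
--         return 0
--     return count
-- ===== SOURCE B (Python) =====
-- def count_before_max(arr):
--     if not arr:
--         return None
--     mx = max(arr)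
--     below = [x for x in arr if x < mx]
--     if not below:
--         return 0
--     mx2 = max(below)
--     if mx2 < -1:
--         return 0
--     return below.count(mx2)
-- ===== Notes on version B (the rewrite author's own statement) =====
-- stated objective: simpler
-- what changed: Replaces A's single pass that tracks a running second-max sentinel and count with a plain decomposition: filter the elements below max, take their max, count it (keeping A's explicit mx2 < -1 guard).
import Mathlib
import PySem

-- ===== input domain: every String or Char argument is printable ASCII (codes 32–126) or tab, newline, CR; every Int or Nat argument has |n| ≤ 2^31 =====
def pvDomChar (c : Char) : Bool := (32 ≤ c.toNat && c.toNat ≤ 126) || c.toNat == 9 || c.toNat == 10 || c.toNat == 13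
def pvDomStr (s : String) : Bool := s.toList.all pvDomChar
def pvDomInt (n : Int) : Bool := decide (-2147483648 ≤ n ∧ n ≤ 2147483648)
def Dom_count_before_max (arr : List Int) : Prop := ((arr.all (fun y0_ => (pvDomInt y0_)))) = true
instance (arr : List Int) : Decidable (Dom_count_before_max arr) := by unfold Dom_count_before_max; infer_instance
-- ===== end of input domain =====

-- B replaces A's one-pass second-max/count tracking loop by a filter + max + count decomposition (objective: simpler); same value everywhere.

-- ===== PORT A =====
-- mx2 = float("-inf") is modeled as (none : Option Int); exact, since an int is always > -inf,
-- never == -inf, and -inf < -1 holds.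
def count_before_max (arr : List Int) : Option Int :=
  match arr with
  | [] => none
  | a :: t =>
    let mx := t.foldl max a   -- max(arr)  (PySem.List.max?_id_cons: this IS Python's max)
    let s := (a :: t).foldl (fun (s : Option Int × Int) x =>
      if x < mx ∧ (s.1.all fun m => decide (m < x)) then (some x, 1)
      else if s.1 = some x then (s.1, s.2 + 1)
      else s) ((none : Option Int), (0 : Int))
    if (s.1.all fun m => decide (m < -1)) ∨ s.2 = 0 then some 0 else some s.2

-- ===== PORT B =====
def count_before_max_alt (arr : List Int) : Option Int :=
  match arr with
  | [] => none
  | a :: t =>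
    let mx := t.foldl max a   -- max(arr)
    let below := (a :: t).filter (fun x => x < mx)
    match PySem.List.max? below (fun x => x) with
    | none => some 0          -- "if not below: return 0"
    | some mx2 =>
      if mx2 < -1 then some 0
      else some ((PySem.List.count below mx2 : Nat) : Int)

-- ===== PRECONDITION & SPEC =====
def Spec_count_before_max (arr : List Int) (out : Option Int) : Prop := out = count_before_max_alt arr
instance (arr : List Int) (out : Option Int) : Decidable (Spec_count_before_max arr out) := by unfold Spec_count_before_max; infer_instance

-- ===== CLAIM (what is proved, stated in full; the proofs are below) =====
def Claim_equal_count_before_max : Prop := ∀ (arr : List Int), Dom_count_before_max arr → Spec_count_before_max arr (count_before_max arr)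

-- ===== LEMMAS AND PROOFS =====

-- the abstract state A's loop maintains, expressed over the filtered list
def pvState (f : List Int) : Option Int × Int :=
  match PySem.List.max? f (fun x => x) with
  | none => (none, 0)
  | some m => (some m, ((f.count m : Nat) : Int))

def pvStep (mx : Int) (s : Option Int × Int) (x : Int) : Option Int × Int :=
  if x < mx ∧ (s.1.all fun m => decide (m < x)) then (some x, 1)
  else if s.1 = some x then (s.1, s.2 + 1)
  else s

theorem pvMax?_append (f : List Int) (x m : Int)
    (h : PySem.List.max? f (fun y => y) = some m) :
    PySem.List.max? (f ++ [x]) (fun y => y) = some (max m x) := by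
  cases f with
  | nil => exact absurd h (by simp [PySem.List.max?])
  | cons a t =>
    rw [PySem.List.max?_id_cons] at h
    simp only [List.cons_append, PySem.List.max?_id_cons, List.foldl_append]
    simp_all

theorem pvState_step (mx : Int) (f : List Int) (x : Int)
    (hf : ∀ y ∈ f, y < mx) :
    pvStep mx (pvState f) x = pvState (f ++ if x < mx then [x] else []) := by
  rcases hm : PySem.List.max? f (fun y => y) with _ | m
  · -- f = []
    have hfe : f = [] := by
      rcases f with _ | ⟨a, t⟩
      · rfl
      · rw [PySem.List.max?_id_cons] at hm; exact absurd hm (by simp)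
    subst hfe
    by_cases hx : x < mx <;>
      simp [pvState, pvStep, hx, Option.all, PySem.List.max?_id_cons, PySem.List.max?]
  · have hmem : m ∈ f := PySem.List.max?_mem hm
    have hmax : ∀ y ∈ f, y ≤ m := by
      intro y hy; exact PySem.List.max?_isMax hm y hy
    by_cases hx : x < mx
    · -- element kept by the filter
      rcases lt_trichotomy m x with hlt | heq | hgt
      · -- new strict max: count resets to 1 (x not in f)
        have hnot : x ∉ f := fun hxf => absurd (hmax x hxf) (not_le.2 hlt)
        have : max m x = x := max_eq_right (le_of_lt hlt)
        simp [pvState, pvStep, hm, hx, hlt, pvMax?_append f x m hm, this,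
          List.count_append, List.count_eq_zero.2 hnot]
      · -- equal to current max: count increments
        have h1 : ¬ (x < mx ∧ ((some m : Option Int).all fun m' => decide (m' < x)) = true) := by
          simp [Option.all]; intro _; omega
        have hmx' : max m x = m := by omega
        simp [pvState, pvStep, hm, h1, hx, heq, hmx', pvMax?_append f x m hm,
          List.count_append, List.count_cons]
      · -- smaller: state unchanged in value and count
        have h2 : ¬ ((some m : Option Int) = some x) := by
          simp; omega
        have hmx' : max m x = m := max_eq_left (le_of_lt hgt)
        simp [pvState, pvStep, Option.all, hm, h2, hx,
          pvMax?_append f x m hm, hmx', List.count_append, List.count_cons]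
        rw [if_neg (show ¬ m < x by omega), if_neg (show ¬ x = m by omega)]
        simp
    · -- x ≥ mx: dropped by the filter and by both branches (all of f is < mx ≤ x)
      have hmlt : m < mx := hf m hmem
      have h2 : ¬ ((some m : Option Int) = some x) := by simp; omega
      simp [pvStep, hx, h2, pvState, hm]

theorem pvLoop (mx : Int) (l : List Int) (f : List Int)
    (hf : ∀ y ∈ f, y < mx) :
    l.foldl (pvStep mx) (pvState f) = pvState (f ++ l.filter (fun x => x < mx)) := by
  induction l generalizing f with
  | nil => simp
  | cons x t ih =>
    simp only [List.foldl_cons, pvState_step mx f x hf, List.filter_cons]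
    by_cases hx : x < mx
    · have := ih (f ++ [x]) (by intro y hy; rcases List.mem_append.1 hy with h | h
                                · exact hf y h
                                · simp at h; omega)
      simpa [hx, List.append_assoc] using this
    · simpa [hx] using ih f hf

-- ===== VERDICT (by name: the statement is the Claim_ definition above) =====
theorem count_before_max_spec : Claim_equal_count_before_max := by
  intro arr _
  unfold Spec_count_before_max
  cases arr with
  | nil => rfl
  | cons a t =>
    have hA : count_before_max (a :: t) =
        (if ((((a :: t).foldl (pvStep (t.foldl max a)) (none, 0)).1.all fun m => decide (m < -1)) : Bool) ∨
            ((a :: t).foldl (pvStep (t.foldl max a)) (none, 0)).2 = 0 then some 0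
         else some ((a :: t).foldl (pvStep (t.foldl max a)) (none, 0)).2) := rfl
    have hB : count_before_max_alt (a :: t) =
        (match PySem.List.max? ((a :: t).filter (fun x => x < t.foldl max a)) (fun x => x) with
         | none => some 0
         | some mx2 => if mx2 < -1 then some 0
                       else some ((PySem.List.count ((a :: t).filter (fun x => x < t.foldl max a)) mx2 : Nat) : Int)) := rfl
    rw [hA, hB]
    have hloop : (a :: t).foldl (pvStep (t.foldl max a)) ((none : Option Int), (0 : Int)) =
        pvState ((a :: t).filter (fun x => x < t.foldl max a)) := by
      have := pvLoop (t.foldl max a) (a :: t) [] (by simp)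
      simpa [pvState] using this
    rw [hloop]
    set below := (a :: t).filter (fun x => x < t.foldl max a) with hbelow
    rcases hm : PySem.List.max? below (fun y => y) with _ | m
    · simp [pvState, hm]
    · have hmem : m ∈ below := PySem.List.max?_mem hm
      have hcnt : 0 < below.count m := List.count_pos_iff.2 hmem
      by_cases hlt : m < -1
      · simp [pvState, hm, hlt, Option.all, PySem.List.count]
      · have h0 : ¬ (List.count m below = 0) := by omega
        simp [pvState, hm, hlt, Option.all, PySem.List.count, h0]
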